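-- pv_equiv track=rewrite | github.com/JefJacobs00/PT_CTF | Programming/Labirynth/Challenge.py | visualize
-- ===== SOURCE A (Python) =====
-- def visualize(mst, n):
--     layout = []
--     layout.append(["S"])
--     for i in range(1, len(mst)):
--         source = (i//n, i%n)
--         dest = (mst[i]//n, mst[i]%n)
--         if source[1] == 0:
--             layout.append([])
--         # columns
--         if dest[1] != source[1]:
--             layout[source[0]].append("H")
--         # rows
--         elif dest[0] != source[0]:
--             layout[source[0]].append("V")
--
--     return layout
-- ===== SOURCE B (Python) =====
-- def visualize(mst, n):
--     m = len(mst)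
--     if m <= 1:
--         return [["S"]]
--     layout = []
--     for start in range(0, m, n):
--         row = ["S"] if start == 0 else []
--         for i in range(max(start, 1), min(start + n, m)):
--             if mst[i] % n != i % n:
--                 row.append("H")
--             elif mst[i] // n != i // n:
--                 row.append("V")
--         layout.append(row)
--     return layout
-- ===== Notes on version B (the rewrite author's own statement) =====
-- stated objective: alternative
-- what changed: B builds the layout row by row, iterating over chunk starts range(0, m, n) and filling each row from its own index range (no per-step tuple construction, row-creation test or layout[i//n] lookup), instead of A's single flat loop that creates rows on i%n==0 and scatter-writes into layout[i//n]; …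
-- outside the precondition, e.g. on visualize([0, 5, 1, 2], -2): A returns [['S', 'V', 'H'], ['H']], B returns []; on visualize([3, 4], 0): A raises ZeroDivisionError, B raises ValueError
import Mathlib
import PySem

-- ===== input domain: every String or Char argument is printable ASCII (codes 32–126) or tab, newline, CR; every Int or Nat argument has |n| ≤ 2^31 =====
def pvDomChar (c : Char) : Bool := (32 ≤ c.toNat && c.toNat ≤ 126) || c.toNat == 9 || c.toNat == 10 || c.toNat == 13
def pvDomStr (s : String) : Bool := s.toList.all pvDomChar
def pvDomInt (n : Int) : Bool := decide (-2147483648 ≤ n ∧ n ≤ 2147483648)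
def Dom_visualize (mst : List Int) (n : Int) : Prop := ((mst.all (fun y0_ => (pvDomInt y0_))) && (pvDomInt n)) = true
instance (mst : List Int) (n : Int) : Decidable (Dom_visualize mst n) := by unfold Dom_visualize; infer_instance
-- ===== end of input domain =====

-- B builds the maze layout row by row from chunk index ranges instead of A's flat loop
-- that scatter-writes into layout[i//n]; equivalence is proved for positive row width n
-- (plus trivial inputs), see Pre_visualize.

-- ===== PORT A =====
-- 'layout[idx].append(s)': exact for 0 ≤ idx < len(layout), the only indices A reaches under Pre_visualize
def pyAppendAt (L : List (List String)) (idx : Int) (s : String) : List (List String) :=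
  match L with
  | [] => []
  | r :: rest => if idx = 0 then (r ++ [s]) :: rest else r :: pyAppendAt rest (idx - 1) s

def visualize (mst : List Int) (n : Int) : List (List String) :=
  (PySem.List.pyRange 1 (mst.length : Int) 1).foldl (fun layout i =>
    let s0 := PySem.Int.floordiv i n
    let s1 := PySem.Int.mod i n
    let v := PySem.List.pyGetD mst i 0
    let d0 := PySem.Int.floordiv v n
    let d1 := PySem.Int.mod v n
    let layout' := if s1 = 0 then layout ++ [([] : List String)] else layout
    if d1 ≠ s1 then pyAppendAt layout' s0 "H"
    else if d0 ≠ s0 then pyAppendAt layout' s0 "V"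
    else layout') [["S"]]

-- ===== PORT B =====
def visualize_alt (mst : List Int) (n : Int) : List (List String) :=
  if (mst.length : Int) ≤ 1 then [["S"]]
  else (PySem.List.pyRange 0 (mst.length : Int) n).map (fun start =>
    (PySem.List.pyRange (max start 1) (min (start + n) (mst.length : Int)) 1).foldl (fun row i =>
      let v := PySem.List.pyGetD mst i 0
      if PySem.Int.mod v n ≠ PySem.Int.mod i n then row ++ ["H"]
      else if PySem.Int.floordiv v n ≠ PySem.Int.floordiv i n then row ++ ["V"]
      else row) (if start = 0 then ["S"] else []))

-- ===== PRECONDITION & SPEC =====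
-- Pre_ excludes n = 0 with 2 ≤ len(mst), where A raises ZeroDivisionError, and n < 0 with
-- 2 ≤ len(mst), where A's returned layout is an artefact of Python negative-index wraparound
-- (labels accidentally scattered into rows 0 and 1) that B's row-by-row construction does not produce.
def Pre_visualize (mst : List Int) (n : Int) : Prop := 1 ≤ n ∨ mst.length ≤ 1
instance (mst : List Int) (n : Int) : Decidable (Pre_visualize mst n) := by unfold Pre_visualize; infer_instance

def pvWitness_visualize : List Int × Int := ([5, 3, 0, 1, 7, 2, 9, 4], 3)

def Spec_visualize (mst : List Int) (n : Int) (out : List (List String)) : Prop := out = visualize_alt mst n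
instance (mst : List Int) (n : Int) (out : List (List String)) : Decidable (Spec_visualize mst n out) := by unfold Spec_visualize; infer_instance

-- ===== CLAIM (what is proved, stated in full; the proofs are below) =====
def Claim_equal_visualize : Prop := ∀ (mst : List Int) (n : Int), Dom_visualize mst n → Pre_visualize mst n → Spec_visualize mst n (visualize mst n)

-- ===== LEMMAS AND PROOFS =====

-- 'layout[idx].extend(ls)': generalisation of pyAppendAt used by the invariant proof
def pvApp (L : List (List String)) (idx : Int) (ls : List String) : List (List String) :=
  match L with
  | [] => []
  | r :: rest => if idx = 0 then (r ++ ls) :: rest else r :: pvApp rest (idx - 1) ls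

theorem pyAppendAt_eq_pvApp (L : List (List String)) (idx : Int) (s : String) :
    pyAppendAt L idx s = pvApp L idx [s] := by
  induction L generalizing idx with
  | nil => rfl
  | cons x xs ih => simp only [pyAppendAt, pvApp, ih]

theorem pvApp_nil (L : List (List String)) (idx : Int) : pvApp L idx [] = L := by
  induction L generalizing idx with
  | nil => rfl
  | cons x xs ih => simp only [pvApp, ih, List.append_nil]; split <;> rfl

theorem pvApp_last (L : List (List String)) (r ls : List String) :
    pvApp (L ++ [r]) (L.length : Int) ls = L ++ [r ++ ls] := by
  induction L with
  | nil => simp [pvApp]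
  | cons x xs ih =>
      simp only [List.cons_append, pvApp, List.length_cons]
      have h : ((xs.length + 1 : Nat) : Int) ≠ 0 := by push_cast; omega
      rw [if_neg h]
      have h2 : ((xs.length + 1 : Nat) : Int) - 1 = (xs.length : Int) := by push_cast; omega
      rw [h2, ih]

-- the cell label appended at index i (possibly nothing)
def pvLab (mst : List Int) (n i : Int) : List String :=
  let v := PySem.List.pyGetD mst i 0
  if PySem.Int.mod v n ≠ PySem.Int.mod i n then ["H"]
  else if PySem.Int.floordiv v n ≠ PySem.Int.floordiv i n then ["V"]
  else []

-- the row whose cells come from indices in [max s 1, min (s+n) k)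
def pvRowTo (mst : List Int) (n k s : Int) : List String :=
  (if s = 0 then ["S"] else []) ++ (PySem.List.pyRange (max s 1) (min (s + n) k) 1).flatMap (pvLab mst n)

theorem pvRow_fold (mst : List Int) (n : Int) (ran : List Int) (init : List String) :
    ran.foldl (fun row i =>
      let v := PySem.List.pyGetD mst i 0
      if PySem.Int.mod v n ≠ PySem.Int.mod i n then row ++ ["H"]
      else if PySem.Int.floordiv v n ≠ PySem.Int.floordiv i n then row ++ ["V"]
      else row) init = init ++ ran.flatMap (pvLab mst n) := by
  have h : (fun (row : List String) (i : Int) =>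
      let v := PySem.List.pyGetD mst i 0
      if PySem.Int.mod v n ≠ PySem.Int.mod i n then row ++ ["H"]
      else if PySem.Int.floordiv v n ≠ PySem.Int.floordiv i n then row ++ ["V"]
      else row) = fun row i => row ++ pvLab mst n i := by
    funext row i
    simp only [pvLab]
    split_ifs <;> simp
  rw [h, PySem.List.foldl_append_eq_flatMap]

-- one step of A's loop is 'extend the row at index i//n with the label of i'
theorem pvBody_eq (mst : List Int) (n : Int) (layout : List (List String)) (i : Int) :
    (if PySem.Int.mod (PySem.List.pyGetD mst i 0) n ≠ PySem.Int.mod i n then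
        pyAppendAt layout (PySem.Int.floordiv i n) "H"
     else if PySem.Int.floordiv (PySem.List.pyGetD mst i 0) n ≠ PySem.Int.floordiv i n then
        pyAppendAt layout (PySem.Int.floordiv i n) "V"
     else layout)
    = pvApp layout (PySem.Int.floordiv i n) (pvLab mst n i) := by
  simp only [pvLab, pyAppendAt_eq_pvApp]
  split_ifs <;> simp [pvApp_nil]

-- ceiling-division computations used for row counts
theorem pvCdiv_exact (n q : Int) (hn : 1 ≤ n) :
    (n * q + n - 1) / n = q := by
  have h1 : n * q + n - 1 = (n - 1) + n * q := by ring
  rw [h1, Int.add_mul_ediv_left _ _ (by omega : n ≠ 0), Int.ediv_eq_zero_of_lt (by omega) (by omega)]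
  omega

theorem pvCdiv_mid (n q r : Int) (hn : 1 ≤ n) (hr1 : 1 ≤ r) (hr2 : r ≤ n) :
    (n * q + r + n - 1) / n = q + 1 := by
  have h1 : n * q + r + n - 1 = (r - 1) + n * (q + 1) := by ring
  rw [h1, Int.add_mul_ediv_left _ _ (by omega : n ≠ 0), Int.ediv_eq_zero_of_lt (by omega) (by omega)]
  omega

-- the main invariant: A's fold over range(1, k) equals the row-by-row layout truncated at k
theorem pvInvariant (mst : List Int) (n : Int) (hn : 1 ≤ n) :
    ∀ k : Int, 1 ≤ k →
    (PySem.List.pyRange 1 k 1).foldl (fun layout i =>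
      let s0 := PySem.Int.floordiv i n
      let s1 := PySem.Int.mod i n
      let v := PySem.List.pyGetD mst i 0
      let d0 := PySem.Int.floordiv v n
      let d1 := PySem.Int.mod v n
      let layout' := if s1 = 0 then layout ++ [([] : List String)] else layout
      if d1 ≠ s1 then pyAppendAt layout' s0 "H"
      else if d0 ≠ s0 then pyAppendAt layout' s0 "V"
      else layout') [["S"]]
    = (PySem.List.pyRange 0 k n).map (pvRowTo mst n k) := by
  intro k hk
  induction k, hk using Int.le_induction with
  | base =>
      rw [PySem.List.pyRange_one_eq_nil (le_refl 1), List.foldl_nil]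
      have hpr : PySem.List.pyRange 0 1 n = [0] := by
        rw [PySem.List.pyRange_of_pos 0 1 (by omega : (0:Int) < n)]
        have hc : 1 - 0 + n - 1 = n := by ring
        rw [if_pos (by omega : (0:Int) < 1), hc, Int.ediv_self (by omega : n ≠ 0)]
        norm_num
      rw [hpr]
      simp only [List.map_cons, List.map_nil]
      have hrow : pvRowTo mst n 1 0 = ["S"] := by
        simp only [pvRowTo]
        rw [show max (0:Int) 1 = 1 by omega, show min (0 + n) 1 = 1 by omega,
            PySem.List.pyRange_one_eq_nil (le_refl 1)]
        simp
      rw [hrow]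
  | succ k hk ih =>
      -- peel off i = k
      rw [PySem.List.pyRange_one_succ_right (by omega : (1:Int) ≤ k), List.foldl_append,
          List.foldl_cons, List.foldl_nil, ih]
      simp only [pvBody_eq]
      have hn0 : n ≠ 0 := by omega
      have hfd : PySem.Int.floordiv k n = k / n := PySem.Int.floordiv_eq_ediv_of_pos (by omega)
      have hmd : PySem.Int.mod k n = k % n := PySem.Int.mod_eq_emod_of_pos (by omega)
      set q := k / n with hq
      set r := k % n with hr
      have hqr : k = n * q + r := by rw [hq, hr]; linarith [Int.mul_ediv_add_emod k n]
      have hr0 : 0 ≤ r := Int.emod_nonneg k hn0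
      have hrn : r < n := Int.emod_lt_of_pos k (by omega)
      have hq0 : 0 ≤ q := by
        by_contra hcon
        have : q ≤ -1 := by omega
        nlinarith
      -- both pyRanges in List.range form
      rw [PySem.List.pyRange_of_pos 0 k (by omega : (0:Int) < n),
          PySem.List.pyRange_of_pos 0 (k+1) (by omega : (0:Int) < n),
          if_pos (by omega : (0:Int) < k), if_pos (by omega : (0:Int) < k + 1),
          List.map_map, List.map_map]
      by_cases hdvd : r = 0
      · -- k is a multiple of n: a new row is created and the label goes into it
        have hq1 : 1 ≤ q := by
          by_contra h
          have hq0' : q = 0 := by omega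
          rw [hq0', mul_zero] at hqr
          omega
        have hc1 : ((k - 0 + n - 1) / n).toNat = q.toNat := by
          have h1 : k - 0 + n - 1 = n * q + n - 1 := by linarith
          rw [h1, pvCdiv_exact n q hn]
        have hc2 : ((k + 1 - 0 + n - 1) / n).toNat = q.toNat + 1 := by
          have h1 : k + 1 - 0 + n - 1 = n * q + 1 + n - 1 := by linarith
          rw [h1, pvCdiv_mid n q 1 hn (le_refl 1) (by omega)]
          omega
        rw [hc1, hc2, hmd, hdvd, if_pos rfl, List.range_succ, List.map_append, List.map_singleton]
        -- old rows are unchanged when the cut moves from k to k+1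
        have hrows : ∀ j ∈ List.range q.toNat,
            (pvRowTo mst n (k+1) ∘ fun kk : Nat => 0 + n * (kk:Int)) j
              = (pvRowTo mst n k ∘ fun kk : Nat => 0 + n * (kk:Int)) j := by
          intro j hj
          have hjq : (j:Int) < q := by
            have := List.mem_range.mp hj
            omega
          simp only [Function.comp_apply, pvRowTo]
          have h1 : n * ((j:Int) + 1) ≤ n * q := mul_le_mul_of_nonneg_left (by omega) (by omega)
          have h2 : n * ((j:Int) + 1) = n * (j:Int) + n := by ring
          rw [min_eq_left (by linarith), min_eq_left (by linarith)]
        rw [List.map_congr_left hrows]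
        -- the new row holds exactly the label of k
        have hnew : (pvRowTo mst n (k+1) ∘ fun kk : Nat => 0 + n * (kk:Int)) q.toNat
            = pvLab mst n k := by
          simp only [Function.comp_apply, pvRowTo]
          have hnq : 0 + n * (q.toNat : Int) = k := by
            rw [show ((q.toNat : Int)) = q by omega]; linarith
          rw [hnq, if_neg (by omega : ¬ k = 0)]
          have hmax : max k 1 = k := by omega
          have hmin : min (k + n) (k + 1) = k + 1 := by omega
          rw [hmax, hmin, PySem.List.pyRange_one_singleton]
          simp
        rw [hnew]
        -- append at index q = length of the old rows, on layout ++ [[]]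
        have hlen : ((List.map (pvRowTo mst n k ∘ fun kk : Nat => 0 + n * (kk:Int)) (List.range q.toNat)).length : Int)
            = PySem.Int.floordiv k n := by
          simp [hfd]; omega
        rw [← hlen, pvApp_last]
        simp
      · -- k is not a multiple of n: the label goes to the current last row
        have hr1 : 1 ≤ r := by omega
        have hc1 : ((k - 0 + n - 1) / n).toNat = q.toNat + 1 := by
          have h1 : k - 0 + n - 1 = n * q + r + n - 1 := by linarith
          rw [h1, pvCdiv_mid n q r hn hr1 (by omega)]
          omega
        have hc2 : ((k + 1 - 0 + n - 1) / n).toNat = q.toNat + 1 := by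
          have h1 : k + 1 - 0 + n - 1 = n * q + (r + 1) + n - 1 := by linarith
          rw [h1, pvCdiv_mid n q (r+1) hn (by omega) (by omega)]
          omega
        rw [hc1, hc2, hmd, if_neg (by omega : ¬ r = 0), List.range_succ,
            List.map_append, List.map_append, List.map_singleton, List.map_singleton]
        have hrows : ∀ j ∈ List.range q.toNat,
            (pvRowTo mst n (k+1) ∘ fun kk : Nat => 0 + n * (kk:Int)) j
              = (pvRowTo mst n k ∘ fun kk : Nat => 0 + n * (kk:Int)) j := by
          intro j hj
          have hjq : (j:Int) < q := by
            have := List.mem_range.mp hj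
            omega
          simp only [Function.comp_apply, pvRowTo]
          have h1 : n * ((j:Int) + 1) ≤ n * q := mul_le_mul_of_nonneg_left (by omega) (by omega)
          have h2 : n * ((j:Int) + 1) = n * (j:Int) + n := by ring
          rw [min_eq_left (by linarith), min_eq_left (by linarith)]
        rw [List.map_congr_left hrows]
        -- the last row gains the label of k
        have hlast : (pvRowTo mst n (k+1) ∘ fun kk : Nat => 0 + n * (kk:Int)) q.toNat
            = (pvRowTo mst n k ∘ fun kk : Nat => 0 + n * (kk:Int)) q.toNat ++ pvLab mst n k := by
          simp only [Function.comp_apply, pvRowTo]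
          have hnq : 0 + n * (q.toNat : Int) = n * q := by
            have hqt : (q.toNat : Int) = q := by omega
            rw [hqt]; ring
          rw [hnq]
          have hmin1 : min (n * q + n) (k + 1) = k + 1 := min_eq_right (by linarith)
          have hmin2 : min (n * q + n) k = k := min_eq_right (by linarith)
          rw [hmin1, hmin2]
          have hle : max (n * q) 1 ≤ k := max_le (by linarith) (by omega)
          rw [PySem.List.pyRange_one_succ_right hle, List.flatMap_append]
          simp [List.append_assoc]
        rw [hlast]
        have hlen : ((List.map (pvRowTo mst n k ∘ fun kk : Nat => 0 + n * (kk:Int)) (List.range q.toNat)).length : Int)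
            = PySem.Int.floordiv k n := by
          simp [hfd]; omega
        rw [← hlen, pvApp_last]

-- ===== VERDICT (by name: the statement is the Claim_ definition above) =====
theorem visualize_spec : Claim_equal_visualize := by
  intro mst n _hdom hpre
  unfold Spec_visualize visualize visualize_alt
  by_cases hm : (mst.length : Int) ≤ 1
  · rw [PySem.List.pyRange_one_eq_nil hm, List.foldl_nil, if_pos hm]
  · have hn : 1 ≤ n := by
      rcases hpre with h | h
      · exact h
      · exfalso; apply hm; exact_mod_cast h
    rw [if_neg hm]
    have := pvInvariant mst n hn (mst.length : Int) (by omega)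
    rw [this]
    apply List.map_congr_left
    intro s _hs
    rw [pvRow_fold]
    rfl
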